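-- pv_equiv track=rewrite | github.com/lhm-limux/gosa | plugins/libinst.boot.preseed/src/libinst/boot/preseed/disk.py | __getNextPartition
-- ===== SOURCE A (Python) =====
-- def __getNextPartition(partitions, primary=False):
--     start = 1 if primary else 5
--     end = 4 if primary else 15
--
--     for nr in range(start, end + 1):
--         if not nr in partitions:
--             partitions.append(nr)
--             return nr
--
--     return None
-- ===== SOURCE B (Python) =====
-- def __getNextPartition(partitions, primary=False):
--     start, end = (1, 4) if primary else (5, 15)
--     cand = start
--     for p in sorted(set(x for x in partitions if start <= x <= end)):
--         if p == cand:
--             cand += 1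
--     if cand > end:
--         return None
--     partitions.append(cand)
--     return cand
-- ===== Notes on version B (the rewrite author's own statement) =====
-- stated objective: alternative
-- what changed: Replaces the ascending membership scan over the whole range by sorting the distinct in-range partition numbers once and walking them with a gap counter: cand starts at start and is bumped past each taken slot, so no per-candidate membership test over partitions remains.
import Mathlib
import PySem

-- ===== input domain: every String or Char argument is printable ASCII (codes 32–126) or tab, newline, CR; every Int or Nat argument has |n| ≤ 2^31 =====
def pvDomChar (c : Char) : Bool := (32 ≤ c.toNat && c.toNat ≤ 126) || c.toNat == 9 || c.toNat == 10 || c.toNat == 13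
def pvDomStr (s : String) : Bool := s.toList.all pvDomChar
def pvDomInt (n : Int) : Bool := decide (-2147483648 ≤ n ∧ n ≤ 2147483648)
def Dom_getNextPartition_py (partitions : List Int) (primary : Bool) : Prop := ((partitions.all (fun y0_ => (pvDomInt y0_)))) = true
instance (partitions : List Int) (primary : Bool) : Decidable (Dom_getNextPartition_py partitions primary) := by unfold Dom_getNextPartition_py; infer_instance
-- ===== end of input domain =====

-- B sorts the distinct in-range partition numbers once and walks them with a gap counter
-- instead of testing each candidate against the list; objective: alternative. Both programs
-- append the returned number to `partitions` exactly when a value is returned; the theorems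
-- here are about the return value only.

-- ===== PORT A =====
-- A: scan range(start, end+1) in ascending order, return the first nr not in partitions
-- (find? = the early-return for-loop), else None.
def getNextPartition_py (partitions : List Int) (primary : Bool) : Option Int :=
  let start : Int := if primary then 1 else 5
  let stop : Int := if primary then 4 else 15
  (PySem.List.pyRange start (stop + 1) 1).find? (fun nr => !(partitions.contains nr))

-- ===== PORT B =====
-- B: sort the distinct partition numbers inside [start, end] (sorted(set(filter))) and walk
-- them once with a counter cand that is bumped past every taken slot; None iff cand > end.
def getNextPartition_py_alt (partitions : List Int) (primary : Bool) : Option Int :=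
  let se : Int × Int := if primary then (1, 4) else (5, 15)
  let taken : List Int :=
    PySem.List.sorted
      (PySem.Set.ofList (partitions.filter (fun x => se.1 ≤ x && x ≤ se.2)))
      (fun x => x) false
  let cand : Int := taken.foldl (fun c p => if p = c then c + 1 else c) se.1
  if se.2 < cand then none else some cand

-- ===== PRECONDITION & SPEC =====
def Spec_getNextPartition_py (partitions : List Int) (primary : Bool) (out : Option Int) : Prop := out = getNextPartition_py_alt partitions primary
instance (partitions : List Int) (primary : Bool) (out : Option Int) : Decidable (Spec_getNextPartition_py partitions primary out) := by unfold Spec_getNextPartition_py; infer_instance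

-- ===== CLAIM (what is proved, stated in full; the proofs are below) =====
def Claim_equal_getNextPartition_py : Prop := ∀ (partitions : List Int) (primary : Bool), Dom_getNextPartition_py partitions primary → Spec_getNextPartition_py partitions primary (getNextPartition_py partitions primary)

-- ===== LEMMAS AND PROOFS =====

-- the gap walk over a list everywhere above a leaves the counter at a
theorem pvWalk_const (a : Int) (s : List Int) (h : ∀ x ∈ s, a < x) :
    s.foldl (fun c p => if p = c then c + 1 else c) a = a := by
  induction s with
  | nil => rfl
  | cons x t ih =>
    have hx : x ≠ a := by have := h x (by simp); omega
    simp only [List.foldl_cons, if_neg hx]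
    exact ih (fun y hy => h y (by simp [hy]))

-- the gap walk over a strictly increasing list of values ≥ a computes the least value ≥ a
-- missing from the list
theorem pvWalk_spec (s : List Int) : ∀ (a : Int), s.Pairwise (· < ·) → (∀ x ∈ s, a ≤ x) →
    a ≤ s.foldl (fun c p => if p = c then c + 1 else c) a ∧
    s.foldl (fun c p => if p = c then c + 1 else c) a ∉ s ∧
    ∀ m, a ≤ m → m < s.foldl (fun c p => if p = c then c + 1 else c) a → m ∈ s := by
  induction s with
  | nil =>
    intro a _ _
    simp only [List.foldl_nil]
    exact ⟨le_refl a, by simp, fun m hm hlt => absurd hlt (by omega)⟩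
  | cons x t ih =>
    intro a hp hge
    rcases List.pairwise_cons.mp hp with ⟨hx, ht⟩
    by_cases hxa : x = a
    · subst hxa
      simp only [List.foldl_cons, reduceIte]
      obtain ⟨h1, h2, h3⟩ := ih (x + 1) ht (fun y hy => by have := hx y hy; omega)
      refine ⟨by omega, ?_, ?_⟩
      · intro hc
        rcases List.mem_cons.mp hc with hc | hc
        · omega
        · exact h2 hc
      · intro m hm hlt
        by_cases hmx : m = x
        · simp [hmx]
        · exact List.mem_cons_of_mem _ (h3 m (by omega) hlt)
    · have hxgt : a < x := lt_of_le_of_ne (hge x (by simp)) (fun h => hxa h.symm)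
      simp only [List.foldl_cons, if_neg hxa]
      rw [pvWalk_const a t (fun y hy => lt_trans hxgt (hx y hy))]
      refine ⟨le_refl a, ?_, fun m hm hlt => absurd hlt (by omega)⟩
      intro hc
      rcases List.mem_cons.mp hc with hc | hc
      · omega
      · have := hx a hc; omega

-- find? over range(a, b+1) of a predicate that is false strictly below c and true at c
theorem pvFind_range (p : Int → Bool) : ∀ (n : Nat) (a b c : Int), b + 1 - a ≤ (n : Int) →
    a ≤ c → (∀ k, a ≤ k → k < c → p k = false) → (c ≤ b → p c = true) →
    (PySem.List.pyRange a (b + 1) 1).find? p = if b < c then none else some c := by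
  intro n
  induction n with
  | zero =>
    intro a b c hlen hac _ _
    rw [PySem.List.pyRange_one_eq_nil (by omega), List.find?_nil, if_pos (by omega)]
  | succ n ih =>
    intro a b c hlen hac hbelow hat
    by_cases hab : b + 1 ≤ a
    · rw [PySem.List.pyRange_one_eq_nil hab, List.find?_nil, if_pos (by omega)]
    · rw [PySem.List.pyRange_one_cons (by omega)]
      by_cases hca : c = a
      · subst hca
        rw [List.find?_cons_of_pos (hat (by omega)), if_neg (by omega)]
      · rw [List.find?_cons_of_neg (by simp [hbelow a (le_refl a) (by omega)])]
        exact ih (a + 1) b c (by omega) (by omega)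
          (fun k hk hlt => hbelow k (by omega) hlt) hat

-- A's scan equals B's gap walk, for any bounds a ≤ candidates ≤ b with b + 1 - a ≤ 20
theorem pvMain (partitions : List Int) (a b : Int) (hn : b + 1 - a ≤ (20 : Int)) :
    (PySem.List.pyRange a (b + 1) 1).find? (fun nr => !(partitions.contains nr)) =
    (if b < (PySem.List.sorted
        (PySem.Set.ofList (partitions.filter (fun x => a ≤ x && x ≤ b)))
        (fun x => x) false).foldl (fun c p => if p = c then c + 1 else c) a then none
     else some ((PySem.List.sorted
        (PySem.Set.ofList (partitions.filter (fun x => a ≤ x && x ≤ b)))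
        (fun x => x) false).foldl (fun c p => if p = c then c + 1 else c) a)) := by
  set taken : List Int := PySem.List.sorted
      (PySem.Set.ofList (partitions.filter (fun x => a ≤ x && x ≤ b)))
      (fun x => x) false with htaken
  have hmem : ∀ x, x ∈ taken ↔ x ∈ partitions ∧ a ≤ x ∧ x ≤ b := by
    intro x
    rw [htaken, PySem.List.mem_sorted, PySem.Set.mem_ofList, List.mem_filter]
    simp
  have hp : taken.Pairwise (· < ·) := htaken ▸ PySem.List.sorted_ofList_pairwise_lt _
  have hge : ∀ x ∈ taken, a ≤ x := fun x hx => ((hmem x).mp hx).2.1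
  obtain ⟨h1, h2, h3⟩ := pvWalk_spec taken a hp hge
  set cand : Int := taken.foldl (fun c p => if p = c then c + 1 else c) a with hcand
  apply pvFind_range _ 20 a b cand hn h1
  · intro k hk hlt
    have : k ∈ partitions := ((hmem k).mp (h3 k hk hlt)).1
    simp [this]
  · intro hcb
    have : cand ∉ partitions := fun hc => h2 ((hmem cand).mpr ⟨hc, h1, hcb⟩)
    simp [this]

-- ===== VERDICT (by name: the statement is the Claim_ definition above) =====
theorem getNextPartition_py_spec : Claim_equal_getNextPartition_py := by
  intro partitions primary _
  unfold Spec_getNextPartition_py getNextPartition_py getNextPartition_py_alt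
  cases primary <;>
    simp only [reduceIte, Bool.false_eq_true] <;>
    exact pvMain partitions _ _ (by norm_num)
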